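-- pv_equiv track=rewrite | github.com/Jorgitou98/task-scheduling | OB algorithm/assign.py | _lpt_alg
-- ===== SOURCE A (Python) =====
-- def _lpt_alg(times_lm, proc_time):
--     n = len(times_lm)
--     lm_loc = [{} for _ in range(n)]
--     for loc, task_t in zip(lm_loc, times_lm):
--         proc_less_load = min(proc_time, key=lambda proc: proc_time[proc][-1])
--         loc["x"] = proc_less_load
--         loc["y"] = proc_time[proc_less_load][-1]
--         loc["num_proc"] = 1
--         loc["time"] = task_t[0]
--         proc_time[proc_less_load].append(loc["y"] + loc["time"])
--         loc["end_time"] = proc_time[proc_less_load][-1]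
--     return lm_loc, proc_time
-- ===== SOURCE B (Python) =====
-- def _ins(pairs, pair):
--     # insert pair into an ascending (load, pos) list, after equal-load earlier positions
--     for i, q in enumerate(pairs):
--         if pair < q:
--             return pairs[:i] + [pair] + pairs[i:]
--     return pairs + [pair]
--
-- def _lpt_alg(times_lm, proc_time):
--     if not times_lm:
--         return [], proc_time
--     procs = list(proc_time)
--     order = []                      # ascending list of (current load, processor position)
--     for pos, p in enumerate(procs):
--         order = _ins(order, (proc_time[p][-1], pos))
--     tails = [[] for _ in procs]     # what each processor's list gains, batched
--     lm_loc = []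
--     for task_t in times_lm:
--         (y, pos), rest = order[0], order[1:]
--         t = task_t[0]
--         end = y + t
--         tails[pos].append(end)
--         lm_loc.append({"x": procs[pos], "y": y, "num_proc": 1, "time": t, "end_time": end})
--         order = _ins(rest, (end, pos))
--     for p, tail in zip(procs, tails):
--         proc_time[p].extend(tail)
--     return lm_loc, proc_time
-- ===== Notes on version B (the rewrite author's own statement) =====
-- stated objective: alternative
-- what changed: A rescans the whole dict with min(proc_time, key=...) and mutates the dict's lists on every task; B keeps a sorted queue of (load, position) pairs (O(1) selection of the least-loaded processor, ordered re-insertion of its updated load) and batches each processor's appended end-times, writing them into proc_time once at the end.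
import Mathlib
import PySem

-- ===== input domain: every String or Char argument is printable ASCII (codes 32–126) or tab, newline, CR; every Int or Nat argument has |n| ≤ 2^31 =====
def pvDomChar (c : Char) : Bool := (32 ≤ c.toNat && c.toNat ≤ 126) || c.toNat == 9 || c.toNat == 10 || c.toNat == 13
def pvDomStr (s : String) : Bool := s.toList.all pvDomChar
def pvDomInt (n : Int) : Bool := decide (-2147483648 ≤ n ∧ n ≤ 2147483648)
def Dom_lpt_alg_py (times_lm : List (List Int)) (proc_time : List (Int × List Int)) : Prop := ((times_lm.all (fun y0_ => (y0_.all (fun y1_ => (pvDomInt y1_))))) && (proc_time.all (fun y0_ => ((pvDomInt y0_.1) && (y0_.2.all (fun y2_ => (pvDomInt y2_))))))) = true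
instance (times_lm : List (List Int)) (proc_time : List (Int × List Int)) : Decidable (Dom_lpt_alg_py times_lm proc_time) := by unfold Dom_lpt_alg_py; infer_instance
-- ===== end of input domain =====

-- B replaces A's per-task min-scan over the dict (with repeated dict/list indexing) by a sorted
-- queue of (load, position) pairs — O(1) selection, ordered re-insertion — and batches the
-- per-processor appends, writing the dict once at the end ('alternative'; same asymptotic cost).
-- Both the Python A and the Python B mutate proc_time's lists in place (same final mutation);
-- the equivalence proved here is about the returned value.

-- ===== PORT A =====
def lptStepA (st : List (List (String × Int)) × PySem.Dict Int (List Int)) (task_t : List Int) :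
    List (List (String × Int)) × PySem.Dict Int (List Int) :=
  let pt := st.2
  let pls := PySem.List.minD pt.keys (fun proc => PySem.List.pyGetD (pt.getD proc []) (-1) 0) 0
  let y := PySem.List.pyGetD (pt.getD pls []) (-1) 0
  let tm := PySem.List.pyGetD task_t 0 0
  let newList := pt.getD pls [] ++ [y + tm]
  let pt' := pt.insert pls newList
  let et := PySem.List.pyGetD newList (-1) 0
  (st.1 ++ [[("x", pls), ("y", y), ("num_proc", 1), ("time", tm), ("end_time", et)]], pt')

def lpt_alg_py (times_lm : List (List Int)) (proc_time : List (Int × List Int)) :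
    (List (List (String × Int))) × (List (Int × List Int)) :=
  let st := times_lm.foldl lptStepA ([], PySem.Dict.ofList proc_time)
  (st.1, st.2.items)

-- ===== PORT B =====
-- Python tuple comparison (a, b) < (c, d) on ints, lexicographic
def pairLt (p q : Int × Int) : Bool :=
  decide (p.1 < q.1) || (decide (p.1 = q.1) && decide (p.2 < q.2))

-- _ins: insert into an ascending list, scanning for the first strictly larger entry
def bIns (pair : Int × Int) : List (Int × Int) → List (Int × Int)
  | [] => [pair]
  | q :: rest => if pairLt pair q then pair :: q :: rest else q :: bIns pair rest

def lptStepB (procs : List Int)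
    (st : List (List (String × Int)) × List (Int × Int) × List (List Int)) (task_t : List Int) :
    List (List (String × Int)) × List (Int × Int) × List (List Int) :=
  match st.2.1 with
  | [] => st  -- order[0] would raise IndexError: unreachable inside Pre_
  | (y, pos) :: rest =>
    let t := PySem.List.pyGetD task_t 0 0
    let e := y + t
    let tails' := PySem.List.pySetD st.2.2 pos (PySem.List.pyGetD st.2.2 pos [] ++ [e])
    (st.1 ++ [[("x", PySem.List.pyGetD procs pos 0), ("y", y), ("num_proc", 1),
               ("time", t), ("end_time", e)]],
     bIns (e, pos) rest, tails')

def lptExtend (d : PySem.Dict Int (List Int)) (p : Int × List Int) : PySem.Dict Int (List Int) :=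
  d.insert p.1 (d.getD p.1 [] ++ p.2)

def lpt_alg_py_alt (times_lm : List (List Int)) (proc_time : List (Int × List Int)) :
    (List (List (String × Int))) × (List (Int × List Int)) :=
  if times_lm = [] then ([], (PySem.Dict.ofList proc_time).items)
  else
    let d0 := PySem.Dict.ofList proc_time
    let procs := d0.keys
    let order0 := (PySem.List.enumerate procs).foldl
      (fun o pp => bIns (PySem.List.pyGetD (d0.getD pp.2 []) (-1) 0, pp.1) o) []
    let st := times_lm.foldl (lptStepB procs)
      ([], order0, List.replicate procs.length ([] : List Int))
    let pt := (procs.zip st.2.2).foldl lptExtend d0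
    (st.1, pt.items)

-- ===== PRECONDITION & SPEC =====
-- Pre_ excludes exactly the inputs where the Python A raises: with at least one task,
-- an empty proc_time (ValueError from min), an empty load list of some processor
-- (IndexError from proc_time[p][-1]) or an empty task row (IndexError from task_t[0]).
def Pre_lpt_alg_py (times_lm : List (List Int)) (proc_time : List (Int × List Int)) : Prop :=
  times_lm = [] ∨
    (proc_time ≠ [] ∧ (∀ v ∈ (PySem.Dict.ofList proc_time).values, v ≠ []) ∧
      ∀ row ∈ times_lm, row ≠ [])
instance (times_lm : List (List Int)) (proc_time : List (Int × List Int)) :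
    Decidable (Pre_lpt_alg_py times_lm proc_time) := by unfold Pre_lpt_alg_py; infer_instance

def pvWitness_lpt_alg_py : List (List Int) × (List (Int × List Int)) :=
  ([[3], [1], [2]], [(1, [0]), (2, [5])])

def Spec_lpt_alg_py (times_lm : List (List Int)) (proc_time : List (Int × List Int))
    (out : (List (List (String × Int))) × (List (Int × List Int))) : Prop :=
  out = lpt_alg_py_alt times_lm proc_time
instance (times_lm : List (List Int)) (proc_time : List (Int × List Int))
    (out : (List (List (String × Int))) × (List (Int × List Int))) :
    Decidable (Spec_lpt_alg_py times_lm proc_time out) := by unfold Spec_lpt_alg_py; infer_instance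

-- ===== CLAIM (what is proved, stated in full; the proofs are below) =====
def Claim_equal_lpt_alg_py : Prop := ∀ (times_lm : List (List Int)) (proc_time : List (Int × List Int)), Dom_lpt_alg_py times_lm proc_time → Pre_lpt_alg_py times_lm proc_time → Spec_lpt_alg_py times_lm proc_time (lpt_alg_py times_lm proc_time)

-- ===== LEMMAS AND PROOFS =====

-- current load of processor k (last element of its list; 0 is the never-used default)
def loadAt (pt : PySem.Dict Int (List Int)) (k : Int) : Int :=
  PySem.List.pyGetD (pt.getD k []) (-1) 0

-- the (load, position) pairs of all processors, by position
def pairsOf (ks : List Int) (pt : PySem.Dict Int (List Int)) : List (Int × Int) :=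
  (List.range ks.length).map (fun j => (loadAt pt (ks.getD j 0), (j : Int)))

-- the loop invariant tying A's dict state to B's (order, tails) state
def LptInv (d0 pt : PySem.Dict Int (List Int)) (order : List (Int × Int))
    (tails : List (List Int)) : Prop :=
  pt.keys = d0.keys ∧ tails.length = d0.keys.length ∧
  order.Pairwise (fun p q => pairLt p q = true) ∧
  order.Perm (pairsOf d0.keys pt) ∧
  ∀ j, j < d0.keys.length →
    pt.getD (d0.keys.getD j 0) [] = d0.getD (d0.keys.getD j 0) [] ++ tails.getD j []

theorem mem_bIns (p x : Int × Int) (l : List (Int × Int)) : x ∈ bIns p l ↔ x = p ∨ x ∈ l := by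
  induction l with
  | nil => simp [bIns]
  | cons q rest ih =>
    by_cases h : pairLt p q = true
    · simp only [bIns, h, ite_true, List.mem_cons]
    · simp only [bIns, h, Bool.false_eq_true, ite_false, List.mem_cons, ih]
      tauto

theorem perm_bIns (p : Int × Int) (l : List (Int × Int)) : (bIns p l).Perm (p :: l) := by
  induction l with
  | nil => simp [bIns]
  | cons q rest ih =>
    by_cases h : pairLt p q = true
    · simp [bIns, h]
    · simp only [bIns, h, Bool.false_eq_true, ite_false]
      exact (ih.cons q).trans (List.Perm.swap p q rest)

theorem pairLt_trans {p q r : Int × Int} (h1 : pairLt p q = true) (h2 : pairLt q r = true) :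
    pairLt p r = true := by
  simp only [pairLt, Bool.or_eq_true, Bool.and_eq_true, decide_eq_true_eq] at *
  omega

theorem pairLt_total_ne {p q : Int × Int} (h : p.2 ≠ q.2) :
    pairLt p q = true ∨ pairLt q p = true := by
  simp only [pairLt, Bool.or_eq_true, Bool.and_eq_true, decide_eq_true_eq]
  omega

theorem pairwise_bIns {p : Int × Int} {l : List (Int × Int)}
    (hl : l.Pairwise (fun a b => pairLt a b = true)) (hne : ∀ q ∈ l, q.2 ≠ p.2) :
    (bIns p l).Pairwise (fun a b => pairLt a b = true) := by
  induction l with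
  | nil => simp [bIns]
  | cons q rest ih =>
    rcases List.pairwise_cons.1 hl with ⟨hq, hrest⟩
    by_cases h : pairLt p q = true
    · simp only [bIns, h, ite_true]
      refine List.pairwise_cons.2 ⟨?_, hl⟩
      intro x hx
      rcases List.mem_cons.1 hx with rfl | hx'
      · exact h
      · exact pairLt_trans h (hq x hx')
    · simp only [bIns, h, Bool.false_eq_true, ite_false]
      refine List.pairwise_cons.2 ⟨?_, ih hrest (fun x hx => hne x (List.mem_cons_of_mem q hx))⟩
      intro x hx
      rcases (mem_bIns p x rest).1 hx with rfl | hx'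
      · rcases pairLt_total_ne (fun hqp => hne q (List.mem_cons_self) (hqp.symm)) with hc | hc
        · exact absurd hc h
        · exact hc
      · exact hq x hx' 

theorem pyGetD_append_neg_one {α : Type} (l : List α) (a d : α) :
    PySem.List.pyGetD (l ++ [a]) (-1) d = a := by
  have h1 : (1 : Nat) ≤ (l ++ [a]).length := by simp
  have := PySem.List.pyGet?_neg_ofNat (l ++ [a]) 1 (by omega) h1
  simp only [PySem.List.pyGetD, this]
  have : (l ++ [a]).length - 1 = l.length := by simp
  rw [this, List.getElem?_concat_length]
  rfl

-- i is the position of the first minimum of f over l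
def IsFirstMin (f : Int → Int) (l : List Int) (i : Nat) : Prop :=
  i < l.length ∧ (∀ j, j < l.length → f (l.getD i 0) ≤ f (l.getD j 0)) ∧
    ∀ j, j < i → f (l.getD i 0) < f (l.getD j 0)

-- the accumulator step of Python's min(..., key=f) (first minimum wins)
def minStep (f : Int → Int) (acc : Option Int) (x : Int) : Option Int :=
  match acc with
  | none => some x
  | some m => if f x < f m then some x else some m

theorem minStep_none (f : Int → Int) (x : Int) : minStep f none x = some x := rfl

theorem minStep_some (f : Int → Int) (m x : Int) :
    minStep f (some m) x = if f x < f m then some x else some m := rfl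

theorem min?_eq_foldl_minStep (f : Int → Int) (l : List Int) :
    PySem.List.min? l f = l.foldl (minStep f) none := by
  unfold PySem.List.min? minStep
  congr 1
  funext acc x
  cases acc <;> rfl

theorem foldl_min_firstMin (f : Int → Int) :
    ∀ (t : List Int) (a : Int), ∃ i,
      (t.foldl (minStep f) (some a) = some ((a :: t).getD i 0)) ∧ IsFirstMin f (a :: t) i := by
  intro t
  induction t with
  | nil =>
    intro a
    exact ⟨0, rfl, by simp [IsFirstMin]⟩
  | cons x t' ih =>
    intro a
    by_cases hfx : f x < f a
    · obtain ⟨i, hfold, him⟩ := ih x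
      refine ⟨i + 1, ?_, ?_, ?_, ?_⟩
      · simpa [minStep_some, hfx] using hfold
      · simpa using him.1
      · intro j hj
        rcases j with _ | j
        · simp only [List.getD_cons_succ, List.getD_cons_zero]
          exact le_of_lt (lt_of_le_of_lt (him.2.1 0 (by simp)) hfx)
        · simp only [List.getD_cons_succ]
          exact him.2.1 j (by simpa using hj)
      · intro j hj
        rcases j with _ | j
        · simp only [List.getD_cons_succ, List.getD_cons_zero]
          exact lt_of_le_of_lt (him.2.1 0 (by simp)) hfx
        · simp only [List.getD_cons_succ]
          exact him.2.2 j (by omega)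
    · obtain ⟨i, hfold, him⟩ := ih a
      rcases i with _ | i
      · refine ⟨0, ?_, by simp, ?_, by omega⟩
        · simpa [minStep_some, hfx] using hfold
        · intro j hj
          rcases j with _ | j
          · simp
          rcases j with _ | j
          · simp only [List.getD_cons_succ, List.getD_cons_zero]
            omega
          · simp only [List.getD_cons_succ, List.getD_cons_zero]
            have := him.2.1 (j + 1) (by simpa using hj)
            simpa using this
      · have hia : f ((a :: t').getD (i+1) 0) < f a := him.2.2 0 (by omega)
        simp only [List.getD_cons_succ] at hia
        refine ⟨i + 2, ?_, ?_, ?_, ?_⟩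
        · simpa [minStep_some, hfx] using hfold
        · have := him.1; simp at this ⊢; omega
        · intro j hj
          rcases j with _ | j
          · simp only [List.getD_cons_succ, List.getD_cons_zero]
            have := him.2.1 0 (by simp)
            simpa using this
          rcases j with _ | j
          · simp only [List.getD_cons_succ, List.getD_cons_zero]
            exact le_of_lt (lt_of_lt_of_le hia (by omega))
          · simp only [List.getD_cons_succ]
            have := him.2.1 (j + 1) (by simp at hj ⊢; omega)
            simpa using this
        · intro j hj
          rcases j with _ | j
          · simp only [List.getD_cons_succ, List.getD_cons_zero]
            exact hia
          rcases j with _ | j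
          · simp only [List.getD_cons_succ, List.getD_cons_zero]
            exact lt_of_lt_of_le hia (by omega)
          · simp only [List.getD_cons_succ]
            have := him.2.2 (j + 1) (by omega)
            simpa using this

theorem firstMin_unique {f : Int → Int} {l : List Int} {i i' : Nat}
    (h : IsFirstMin f l i) (h' : IsFirstMin f l i') : i = i' := by
  rcases Nat.lt_trichotomy i i' with hlt | heq | hgt
  · have h1 := h'.2.2 i hlt
    have h2 := h.2.1 i' h'.1
    omega
  · exact heq
  · have h1 := h.2.2 i' hgt
    have h2 := h'.2.1 i h.1
    omega

theorem minD_eq_of_firstMin {f : Int → Int} {ks : List Int} {i : Nat} (d : Int)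
    (hne : ks ≠ []) (h : IsFirstMin f ks i) :
    PySem.List.minD ks f d = ks.getD i 0 := by
  obtain ⟨k, t, rfl⟩ := List.exists_cons_of_ne_nil hne
  obtain ⟨i', hfold, him⟩ := foldl_min_firstMin f t k
  have : PySem.List.minD (k :: t) f d = (k :: t).getD i' 0 := by
    simp only [PySem.List.minD, min?_eq_foldl_minStep, List.foldl_cons, minStep_none, hfold,
      Option.getD_some]
  rw [this, firstMin_unique h him]

theorem pySetD_natCast {α : Type} (xs : List α) (j : Nat) (v : α) (h : j < xs.length) :
    PySem.List.pySetD xs (j : Int) v = xs.set j v := by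
  have h0 : (0:Int) ≤ (j:Int) := Int.natCast_nonneg j
  have h1 : (j:Int) < (xs.length : Int) := by exact_mod_cast h
  simp [PySem.List.pySetD, PySem.List.pySet?, PySem.List.pyIdx?, h0, h1]

theorem length_pairsOf (ks : List Int) (pt : PySem.Dict Int (List Int)) :
    (pairsOf ks pt).length = ks.length := by simp [pairsOf]

theorem getElem_pairsOf (ks : List Int) (pt : PySem.Dict Int (List Int)) (m : Nat)
    (hm : m < (pairsOf ks pt).length) :
    (pairsOf ks pt)[m] = (loadAt pt (ks.getD m 0), (m : Int)) := by
  simp [pairsOf]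

theorem enumerate_eq (l : List Int) :
    ∀ (s : Int), PySem.List.enumerate l s
      = (List.range l.length).map (fun (m : Nat) => (s + (m : Int), l.getD m 0)) := by
  induction l with
  | nil => intro s; simp [PySem.List.enumerate]
  | cons x t ih =>
    intro s
    rw [PySem.List.enumerate, ih (s + 1)]
    simp only [List.length_cons, List.range_succ_eq_map, List.map_cons, List.map_map]
    congr 1
    · simp
    · apply List.map_congr_left
      intro m _
      simp only [Function.comp_apply, List.getD_cons_succ]
      congr 1
      push_cast
      ring

theorem foldl_bIns_perm_pairwise :
    ∀ (L : List (Int × Int)) (o : List (Int × Int)),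
      o.Pairwise (fun a b => pairLt a b = true) →
      ((o ++ L).map Prod.snd).Nodup →
      ((L.foldl (fun o p => bIns p o) o).Pairwise (fun a b => pairLt a b = true) ∧
        (L.foldl (fun o p => bIns p o) o).Perm (o ++ L)) := by
  intro L
  induction L with
  | nil =>
    intro o ho _
    simp only [List.foldl_nil, List.append_nil]
    exact ⟨ho, List.Perm.refl o⟩
  | cons p L' ih =>
    intro o ho hnd
    simp only [List.foldl_cons]
    have hdisj : ∀ q ∈ o, q.2 ≠ p.2 := by
      intro q hq hq2
      have hmv : ((o ++ p :: L').map Prod.snd).Perm (p.2 :: (o ++ L').map Prod.snd) := by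
        have hpm := (List.perm_middle (a := p) (l₁ := o) (l₂ := L')).map Prod.snd
        simpa using hpm
      have hnd2 := (hmv.nodup_iff).1 hnd
      have hpn : p.2 ∉ (o ++ L').map Prod.snd := (List.nodup_cons.1 hnd2).1
      apply hpn
      rw [← hq2]
      exact List.mem_map_of_mem (List.mem_append_left _ hq)
    have hpw' := pairwise_bIns ho hdisj
    have hperm' : (bIns p o).Perm (p :: o) := perm_bIns p o
    have hp2 : ((bIns p o) ++ L').Perm (o ++ p :: L') :=
      (hperm'.append_right L').trans List.perm_middle.symm
    have hnd2 : (((bIns p o) ++ L').map Prod.snd).Nodup :=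
      ((hp2.map Prod.snd).nodup_iff).2 hnd
    obtain ⟨h1, h2⟩ := ih (bIns p o) hpw' hnd2
    exact ⟨h1, h2.trans hp2⟩

theorem getD_foldl_extend_not_mem (l : List (Int × List Int))
    (d : PySem.Dict Int (List Int)) (k : Int) (h : k ∉ l.map (·.1)) :
    ((l.foldl lptExtend d).getD k []) = d.getD k [] := by
  induction l generalizing d with
  | nil => rfl
  | cons q l' ih =>
    simp only [List.map_cons, List.mem_cons] at h
    rw [not_or] at h
    simp only [List.foldl_cons]
    rw [ih _ h.2]
    simp [lptExtend, PySem.Dict.getD_insert, h.1]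

theorem getD_foldl_extend_split (l1 l2 : List (Int × List Int)) (k : Int) (tl : List Int)
    (d : PySem.Dict Int (List Int)) (h1 : k ∉ l1.map (·.1)) (h2 : k ∉ l2.map (·.1)) :
    (((l1 ++ (k, tl) :: l2).foldl lptExtend d).getD k []) = d.getD k [] ++ tl := by
  rw [List.foldl_append, List.foldl_cons]
  rw [getD_foldl_extend_not_mem l2 _ k h2]
  have : (lptExtend (l1.foldl lptExtend d) (k, tl)).getD k []
      = (l1.foldl lptExtend d).getD k [] ++ tl := by
    simp [lptExtend]
  rw [this, getD_foldl_extend_not_mem l1 d k h1]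

theorem keys_foldl_extend (l : List (Int × List Int)) (d : PySem.Dict Int (List Int))
    (h : ∀ p ∈ l, p.1 ∈ d.keys) : (l.foldl lptExtend d).keys = d.keys := by
  induction l generalizing d with
  | nil => rfl
  | cons q l' ih =>
    simp only [List.foldl_cons]
    have hq := h q (List.mem_cons_self)
    have hkeys : (lptExtend d q).keys = d.keys := by
      simp only [lptExtend]
      exact PySem.Dict.keys_insert_of_contains d _
        ((PySem.Dict.contains_iff_mem_keys d q.1).2 hq)
    rw [ih (lptExtend d q) (fun p hp => by
      rw [hkeys]; exact h p (List.mem_cons_of_mem q hp)), hkeys]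

theorem keys_ofList_ne_nil (proc_time : List (Int × List Int)) (h : proc_time ≠ []) :
    (PySem.Dict.ofList proc_time).keys ≠ [] := by
  obtain ⟨q, rest, rfl⟩ := List.exists_cons_of_ne_nil h
  apply List.ne_nil_of_mem (a := q.1)
  have h3 : PySem.Dict.ofList (q :: rest)
      = List.foldl (fun (d : PySem.Dict Int (List Int)) (x : Int × List Int) =>
          d.insert x.1 x.2) PySem.Dict.empty (q :: rest) := rfl
  have h2 := PySem.Dict.keys_foldl_insert_key (q :: rest) (Prod.fst)
    (fun (_ : PySem.Dict Int (List Int)) (x : Int × List Int) => x.2) PySem.Dict.empty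
  simp only [] at h2
  rw [h3, h2]
  simp [PySem.Set.mem_update]

theorem getD_set_self' {α : Type} (l : List α) (i : Nat) (v d : α) (h : i < l.length) :
    (l.set i v).getD i d = v := by
  rw [List.getD_eq_getElem _ _ (by simpa using h), List.getElem_set_self]

theorem getD_set_ne' {α : Type} (l : List α) (i j : Nat) (v d : α) (hne : i ≠ j)
    (hj : j < l.length) : (l.set i v).getD j d = l.getD j d := by
  rw [List.getD_eq_getElem _ _ (by simpa using hj), List.getElem_set_ne hne,
    List.getD_eq_getElem _ _ hj]

set_option maxHeartbeats 1000000 in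
theorem step_rel (d0 : PySem.Dict Int (List Int)) (hnd : d0.keys.Nodup)
    (hne : d0.keys ≠ []) (acc : List (List (String × Int)))
    (pt : PySem.Dict Int (List Int)) (order : List (Int × Int)) (tails : List (List Int))
    (h : LptInv d0 pt order tails) (task_t : List Int) :
    (lptStepA (acc, pt) task_t).1 = (lptStepB d0.keys (acc, order, tails) task_t).1 ∧
      LptInv d0 (lptStepA (acc, pt) task_t).2
        (lptStepB d0.keys (acc, order, tails) task_t).2.1
        (lptStepB d0.keys (acc, order, tails) task_t).2.2 := by
  obtain ⟨hk, hlen, hpw, hperm, hval⟩ := h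
  have hP : 0 < d0.keys.length := by
    cases hks : d0.keys with
    | nil => exact absurd hks hne
    | cons a l => simp
  have hol : order.length = d0.keys.length := by
    have := hperm.length_eq
    rwa [length_pairsOf] at this
  cases order with
  | nil => simp at hol; omega
  | cons hd rest =>
  obtain ⟨y, pos⟩ := hd
  -- the head of the order queue is an entry of pairsOf
  have hmem : (y, pos) ∈ pairsOf d0.keys pt := hperm.subset (List.mem_cons_self)
  simp only [pairsOf, List.mem_map, List.mem_range] at hmem
  obtain ⟨j, hj, hjeq⟩ := hmem
  have hy : loadAt pt (d0.keys.getD j 0) = y := congrArg Prod.fst hjeq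
  have hpos : (j : Int) = pos := congrArg Prod.snd hjeq
  -- decompose pairsOf at index j
  have hjl : j < (pairsOf d0.keys pt).length := by rw [length_pairsOf]; exact hj
  have hpairs_j : (pairsOf d0.keys pt)[j] = (y, pos) := by
    rw [getElem_pairsOf _ _ _ hjl, hy, hpos]
  have hpairs_decomp : pairsOf d0.keys pt
      = (pairsOf d0.keys pt).take j ++ (y, pos) :: (pairsOf d0.keys pt).drop (j+1) := by
    conv_lhs => rw [← List.take_append_drop j (pairsOf d0.keys pt)]
    rw [List.drop_eq_getElem_cons hjl, hpairs_j]
  have hrest : rest.Perm ((pairsOf d0.keys pt).take j ++ (pairsOf d0.keys pt).drop (j+1)) := by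
    apply List.Perm.cons_inv (a := (y, pos))
    refine hperm.trans ?_
    conv_lhs => rw [hpairs_decomp]
    exact List.perm_middle
  -- every entry of rest has a position different from pos
  have hsnd : ∀ q ∈ rest, q.2 ≠ pos := by
    intro q hq
    have hq' := hrest.subset hq
    rcases List.mem_append.1 hq' with h1 | h1
    · obtain ⟨m, hm, hqe⟩ := List.mem_iff_getElem.1 h1
      have hmj : m < j := by
        have := hm; simp [List.length_take, length_pairsOf] at this; omega
      rw [List.getElem_take] at hqe
      rw [← hqe, getElem_pairsOf _ _ _ (by rw [length_pairsOf]; omega)]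
      rw [← hpos]
      intro hc
      have hc2 : (m : Int) = (j : Int) := hc
      have : m = j := by exact_mod_cast hc2
      omega
    · obtain ⟨m, hm, hqe⟩ := List.mem_iff_getElem.1 h1
      rw [List.getElem_drop] at hqe
      rw [← hqe, getElem_pairsOf _ _ _ (by
        have := hm; simp [length_pairsOf] at this ⊢; omega)]
      rw [← hpos]
      intro hc
      have hc2 : ((j + 1 + m : Nat) : Int) = (j : Int) := hc
      have : j + 1 + m = j := by exact_mod_cast hc2
      omega
  -- j is the first minimum of the current loads over the keys
  have hfm : IsFirstMin (loadAt pt) d0.keys j := by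
    refine ⟨hj, ?_, ?_⟩
    · intro m hm
      have hmp : (loadAt pt (d0.keys.getD m 0), (m : Int)) ∈ (y, pos) :: rest := by
        apply hperm.symm.subset
        simp only [pairsOf, List.mem_map, List.mem_range]
        exact ⟨m, hm, rfl⟩
      rcases List.mem_cons.1 hmp with he | hr
      · have := congrArg Prod.fst he
        simp only at this
        rw [hy, this]
      · have hlt := (List.pairwise_cons.1 hpw).1 _ hr
        simp only [pairLt, Bool.or_eq_true, Bool.and_eq_true, decide_eq_true_eq] at hlt
        rw [hy]
        rcases hlt with hlt | ⟨heq, _⟩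
        · exact le_of_lt hlt
        · exact le_of_eq heq
    · intro m hmj
      have hm : m < d0.keys.length := lt_trans hmj hj
      have hmp : (loadAt pt (d0.keys.getD m 0), (m : Int)) ∈ (y, pos) :: rest := by
        apply hperm.symm.subset
        simp only [pairsOf, List.mem_map, List.mem_range]
        exact ⟨m, hm, rfl⟩
      rcases List.mem_cons.1 hmp with he | hr
      · have h2 := congrArg Prod.snd he
        simp only at h2
        rw [← hpos] at h2
        have : m = j := by exact_mod_cast h2
        omega
      · have hlt := (List.pairwise_cons.1 hpw).1 _ hr
        simp only [pairLt, Bool.or_eq_true, Bool.and_eq_true, decide_eq_true_eq] at hlt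
        rw [hy]
        rcases hlt with hlt | ⟨heq, hsn⟩
        · exact hlt
        · exfalso
          rw [← hpos] at hsn
          have : j < m := by exact_mod_cast hsn
          omega
  -- A's chosen processor is d0.keys.getD j 0
  have hjk : d0.keys.getD j 0 ∈ d0.keys := by
    rw [List.getD_eq_getElem _ _ hj]; exact List.getElem_mem hj
  have hpls : PySem.List.minD pt.keys
      (fun proc => PySem.List.pyGetD (pt.getD proc []) (-1) 0) 0 = d0.keys.getD j 0 := by
    have hfeq : (fun proc => PySem.List.pyGetD (pt.getD proc []) (-1) 0) = loadAt pt := rfl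
    rw [hfeq, hk]
    exact minD_eq_of_firstMin 0 hne hfm
  have hcont : pt.contains (d0.keys.getD j 0) = true := by
    rw [PySem.Dict.contains_iff_mem_keys, hk]; exact hjk
  have hkne : ∀ m, m < d0.keys.length → m ≠ j → d0.keys.getD m 0 ≠ d0.keys.getD j 0 := by
    intro m hm hmne
    rw [List.getD_eq_getElem _ _ hm, List.getD_eq_getElem _ _ hj]
    intro hc
    exact hmne (hnd.getElem_inj_iff.1 hc)
  have hjt : j < tails.length := by omega
  -- reduce the two step functions
  simp only [lptStepA, lptStepB, hpls]
  rw [← hpos, pySetD_natCast tails j _ hjt]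
  have hy' : PySem.List.pyGetD (pt.getD (d0.keys.getD j 0) []) (-1) 0 = y := hy
  constructor
  · -- equal accumulator entries
    simp only [List.append_cancel_left_eq]
    have hx : PySem.List.pyGetD d0.keys ((j : Nat) : Int) 0 = d0.keys.getD j 0 := by
      rw [PySem.List.pyGetD_natCast]
    rw [hx, hy', pyGetD_append_neg_one]
  · -- the invariant is preserved
    rw [hy']
    set tm := PySem.List.pyGetD task_t 0 0 with htm
    refine ⟨?_, ?_, ?_, ?_, ?_⟩
    · rw [PySem.Dict.keys_insert_of_contains pt _ hcont, hk]
    · rw [List.length_set]; exact hlen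
    · apply pairwise_bIns (List.pairwise_cons.1 hpw).2
      intro q hq
      have hq2 := hsnd q hq
      rw [← hpos] at hq2
      exact hq2
    · -- permutation with the new pairsOf
      have hload_new : ∀ m, (hm : m < d0.keys.length) → loadAt
          (pt.insert (d0.keys.getD j 0) (pt.getD (d0.keys.getD j 0) [] ++ [y + tm]))
          (d0.keys.getD m 0) = if m = j then y + tm else loadAt pt (d0.keys.getD m 0) := by
        intro m hm
        by_cases hmj : m = j
        · subst hmj
          rw [if_pos rfl]
          simp only [loadAt]
          rw [PySem.Dict.getD_insert, if_pos rfl, pyGetD_append_neg_one]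
        · rw [if_neg hmj]
          simp only [loadAt]
          rw [PySem.Dict.getD_insert, if_neg (hkne m hm hmj)]
      have hpairs' : pairsOf d0.keys
          (pt.insert (d0.keys.getD j 0) (pt.getD (d0.keys.getD j 0) [] ++ [y + tm]))
          = (pairsOf d0.keys pt).set j (y + tm, (j : Int)) := by
        apply List.ext_getElem
        · simp [length_pairsOf, List.length_set]
        · intro m hm1 hm2
          have hmk : m < d0.keys.length := by
            rw [length_pairsOf] at hm1; exact hm1
          rw [getElem_pairsOf _ _ _ hm1, hload_new m hmk]
          by_cases hmj : m = j
          · subst hmj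
            rw [List.getElem_set_self]
            simp
          · rw [List.getElem_set_ne (fun hc => hmj hc.symm)]
            rw [getElem_pairsOf _ _ _ (by rw [length_pairsOf]; exact hmk)]
            simp [hmj]
      rw [hpairs']
      have hset : (pairsOf d0.keys pt).set j (y + tm, (j : Int))
          = (pairsOf d0.keys pt).take j ++ (y + tm, (j : Int)) :: (pairsOf d0.keys pt).drop (j+1) := by
        rw [List.set_eq_take_append_cons_drop]
        rw [if_pos hjl]
      rw [hset]
      refine ((perm_bIns _ _).trans ?_).trans List.perm_middle.symm
      exact hrest.cons _
    · -- the per-processor list decomposition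
      intro m hm
      by_cases hmj : m = j
      · subst hmj
        rw [PySem.Dict.getD_insert, if_pos rfl, getD_set_self' tails m _ [] hjt,
          PySem.List.pyGetD_natCast, hval m hm, List.append_assoc]
      · rw [PySem.Dict.getD_insert, if_neg (hkne m hm hmj), hval m hm]
        congr 1
        rw [getD_set_ne' tails j m _ [] (fun hc => hmj hc.symm) (by omega)]

theorem loop_rel (d0 : PySem.Dict Int (List Int)) (hnd : d0.keys.Nodup)
    (hne : d0.keys ≠ []) :
    ∀ (ts : List (List Int)) (acc : List (List (String × Int)))
      (pt : PySem.Dict Int (List Int)) (order : List (Int × Int)) (tails : List (List Int)),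
      LptInv d0 pt order tails →
      (ts.foldl lptStepA (acc, pt)).1 = (ts.foldl (lptStepB d0.keys) (acc, order, tails)).1 ∧
        LptInv d0 (ts.foldl lptStepA (acc, pt)).2
          (ts.foldl (lptStepB d0.keys) (acc, order, tails)).2.1
          (ts.foldl (lptStepB d0.keys) (acc, order, tails)).2.2 := by
  intro ts
  induction ts with
  | nil => intro acc pt order tails h; exact ⟨rfl, h⟩
  | cons t ts ih =>
    intro acc pt order tails h
    obtain ⟨hacc, hinv⟩ := step_rel d0 hnd hne acc pt order tails h t
    simp only [List.foldl_cons]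
    have e1 : lptStepA (acc, pt) t
        = ((lptStepA (acc, pt) t).1, (lptStepA (acc, pt) t).2) := rfl
    have e2 : lptStepB d0.keys (acc, order, tails) t
        = ((lptStepB d0.keys (acc, order, tails) t).1,
           (lptStepB d0.keys (acc, order, tails) t).2.1,
           (lptStepB d0.keys (acc, order, tails) t).2.2) := rfl
    rw [e1, e2, ← hacc]
    exact ih _ _ _ _ hinv

theorem init_inv (d0 : PySem.Dict Int (List Int)) (_hnd : d0.keys.Nodup) :
    LptInv d0 d0
      ((PySem.List.enumerate d0.keys).foldl
        (fun o pp => bIns (PySem.List.pyGetD (d0.getD pp.2 []) (-1) 0, pp.1) o) [])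
      (List.replicate d0.keys.length ([] : List Int)) := by
  have hL : ((PySem.List.enumerate d0.keys).foldl
        (fun o pp => bIns (PySem.List.pyGetD (d0.getD pp.2 []) (-1) 0, pp.1) o) [])
      = (((PySem.List.enumerate d0.keys).map
          (fun pp => (PySem.List.pyGetD (d0.getD pp.2 []) (-1) 0, pp.1))).foldl
            (fun o p => bIns p o) []) := by
    rw [List.foldl_map]
  have hmapL : (PySem.List.enumerate d0.keys).map
      (fun pp => (PySem.List.pyGetD (d0.getD pp.2 []) (-1) 0, pp.1))
      = pairsOf d0.keys d0 := by
    rw [enumerate_eq]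
    simp only [pairsOf, loadAt, List.map_map]
    apply List.map_congr_left
    intro m _
    simp
  have hnodup : ((([] : List (Int × Int)) ++ pairsOf d0.keys d0).map Prod.snd).Nodup := by
    simp only [List.nil_append, pairsOf, List.map_map]
    refine List.Nodup.map ?_ List.nodup_range
    intro a b hab
    simpa using hab
  obtain ⟨h1, h2⟩ := foldl_bIns_perm_pairwise (pairsOf d0.keys d0) [] List.Pairwise.nil hnodup
  refine ⟨rfl, by simp, ?_, ?_, ?_⟩
  · rw [hL, hmapL]; exact h1
  · rw [hL, hmapL]; simpa using h2
  · intro j hj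
    rw [List.getD_replicate _ hj]
    simp

theorem final_dict (d0 : PySem.Dict Int (List Int)) (hnd : d0.keys.Nodup)
    (pt : PySem.Dict Int (List Int)) (tails : List (List Int))
    (hk : pt.keys = d0.keys) (hlen : tails.length = d0.keys.length)
    (hval : ∀ j, j < d0.keys.length →
      pt.getD (d0.keys.getD j 0) [] = d0.getD (d0.keys.getD j 0) [] ++ tails.getD j []) :
    (d0.keys.zip tails).foldl lptExtend d0 = pt := by
  have hlen' : d0.keys.length ≤ tails.length := le_of_eq hlen.symm
  have hfst : (d0.keys.zip tails).map Prod.fst = d0.keys := List.map_fst_zip hlen'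
  have hkeysF : ((d0.keys.zip tails).foldl lptExtend d0).keys = d0.keys := by
    apply keys_foldl_extend
    intro p hp
    have hm : p.1 ∈ (d0.keys.zip tails).map Prod.fst := List.mem_map_of_mem hp
    rwa [hfst] at hm
  apply PySem.Dict.ext
  rw [PySem.Dict.items_eq_map_keys _ (by rw [hkeysF]; exact hnd) ([] : List Int),
    PySem.Dict.items_eq_map_keys pt (by rw [hk]; exact hnd) ([] : List Int), hkeysF, hk]
  apply List.map_congr_left
  intro k hkmem
  obtain ⟨m, hm, rfl⟩ := List.mem_iff_getElem.1 hkmem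
  have hmz : m < (d0.keys.zip tails).length := by
    simp [List.length_zip]; omega
  have hdec : d0.keys.zip tails
      = (d0.keys.zip tails).take m
        ++ (d0.keys[m], tails.getD m []) :: (d0.keys.zip tails).drop (m+1) := by
    conv_lhs => rw [← List.take_append_drop m (d0.keys.zip tails)]
    rw [List.drop_eq_getElem_cons hmz, List.getElem_zip,
      List.getD_eq_getElem tails [] (by omega)]
  have hnm1 : d0.keys[m] ∉ ((d0.keys.zip tails).take m).map Prod.fst := by
    rw [List.map_take, hfst]
    intro hmemt
    obtain ⟨i, hi, hie⟩ := List.mem_iff_getElem.1 hmemt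
    have hi' : i < m := by
      have := hi; simp [List.length_take] at this; omega
    rw [List.getElem_take] at hie
    have := hnd.getElem_inj_iff.1 hie
    omega
  have hnm2 : d0.keys[m] ∉ ((d0.keys.zip tails).drop (m+1)).map Prod.fst := by
    rw [List.map_drop, hfst]
    intro hmemt
    obtain ⟨i, hi, hie⟩ := List.mem_iff_getElem.1 hmemt
    rw [List.getElem_drop] at hie
    have := hnd.getElem_inj_iff.1 hie
    omega
  have hmain : ((d0.keys.zip tails).foldl lptExtend d0).getD d0.keys[m] []
      = pt.getD d0.keys[m] [] := by
    conv_lhs => rw [hdec]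
    rw [getD_foldl_extend_split _ _ _ _ _ hnm1 hnm2]
    rw [← List.getD_eq_getElem d0.keys 0 hm]
    exact (hval m hm).symm
  rw [hmain]

-- ===== VERDICT (by name: the statement is the Claim_ definition above) =====
set_option maxHeartbeats 600000 in
theorem lpt_alg_py_spec : Claim_equal_lpt_alg_py := by
  intro times_lm proc_time _hdom hpre
  unfold Spec_lpt_alg_py
  by_cases htl : times_lm = []
  · subst htl
    simp [lpt_alg_py, lpt_alg_py_alt]
  · rcases hpre with h0 | ⟨hptne, _hv, _hrows⟩
    · exact absurd h0 htl
    set d0 := PySem.Dict.ofList proc_time with hd0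
    have hnd : d0.keys.Nodup := PySem.Dict.nodup_keys_ofList proc_time
    have hne : d0.keys ≠ [] := keys_ofList_ne_nil proc_time hptne
    have hinit := init_inv d0 hnd
    obtain ⟨hacc, hinv⟩ := loop_rel d0 hnd hne times_lm [] _ _ _ hinit
    obtain ⟨hk, hlen, -, -, hval⟩ := hinv
    have hfin := final_dict d0 hnd _ _ hk hlen hval
    simp only [lpt_alg_py, lpt_alg_py_alt, ← hd0]
    rw [if_neg htl, hfin, hacc]
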